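-- pv_equiv track=rewrite | github.com/KimJuHyang/Algorithm | [Level1]/하샤드 수.py | solution
-- ===== SOURCE A (Python) =====
-- def solution(x):
--     sum = 0
--
--     for i in str(x):
--         temp = int(i)
--         sum += temp
--
--     if x%sum == 0:
--         return True
--
--     return False
-- ===== SOURCE B (Python) =====
-- def solution(x):
--     n, s = x, 0
--     while n > 0:
--         s += n % 10
--         n //= 10
--     return x % s == 0
-- ===== Notes on version B (the rewrite author's own statement) =====
-- stated objective: idiomatic
-- what changed: B computes the digit sum arithmetically (while n > 0: s += n % 10; n //= 10) instead of converting the number to a string and parsing each character back to int.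
-- outside the precondition, e.g. on solution(0): A raises ZeroDivisionError, B raises ZeroDivisionError; on solution(-13): A raises ValueError, B raises ZeroDivisionError
import Mathlib
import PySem

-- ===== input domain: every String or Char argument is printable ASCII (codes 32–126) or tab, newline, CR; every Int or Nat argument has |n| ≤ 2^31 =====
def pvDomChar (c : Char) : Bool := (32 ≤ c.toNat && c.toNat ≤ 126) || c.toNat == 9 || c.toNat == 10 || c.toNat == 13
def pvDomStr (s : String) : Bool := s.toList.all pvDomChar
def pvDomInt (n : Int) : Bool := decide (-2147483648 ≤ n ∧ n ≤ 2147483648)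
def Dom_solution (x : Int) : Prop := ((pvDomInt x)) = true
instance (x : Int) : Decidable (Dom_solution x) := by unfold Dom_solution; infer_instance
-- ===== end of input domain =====

-- B computes the digit sum arithmetically (mod/div by 10) instead of iterating the decimal string; same cost, more idiomatic.


-- ===== PORT A =====
-- for i in str(x): sum += int(i)  — the running sum is an Option (none = ValueError from int(i))
def solution (x : Int) : Bool :=
  match (PySem.Int.toChars x).foldl
      (fun acc c => acc.bind fun s => (PySem.Int.ofChars? [c]).map fun t => s + t)
      (some (0 : Int)) with
  | none => false
  | some s =>
    match PySem.Int.mod? x s with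
    | none => false
    | some r => r == 0

-- ===== PORT B =====
-- while n > 0: s += n % 10; n //= 10
def digitLoop (n s : Int) : Int :=
  if _h : 0 < n then digitLoop (PySem.Int.floordiv n 10) (s + PySem.Int.mod n 10) else s
termination_by n.toNat
decreasing_by
  rw [PySem.Int.floordiv_eq_ediv_of_pos (by omega : (0:Int) < 10)]
  omega

def solution_alt (x : Int) : Bool :=
  match PySem.Int.mod? x (digitLoop x 0) with
  | none => false
  | some r => r == 0

-- ===== PRECONDITION & SPEC =====
-- Pre_ excludes exactly the inputs where A raises: x = 0 (ZeroDivisionError, digit sum 0)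
-- and x < 0 (ValueError on int('-')); B also raises (ZeroDivisionError) on all of them.
def Pre_solution (x : Int) : Prop := 1 ≤ x
instance (x : Int) : Decidable (Pre_solution x) := by unfold Pre_solution; infer_instance
def pvWitness_solution : Int := (10)

def Spec_solution (x : Int) (out : Bool) : Prop := out = solution_alt x
instance (x : Int) (out : Bool) : Decidable (Spec_solution x out) := by unfold Spec_solution; infer_instance

-- ===== CLAIM (what is proved, stated in full; the proofs are below) =====
def Claim_equal_solution : Prop := ∀ (x : Int), Dom_solution x → Pre_solution x → Spec_solution x (solution x)

-- ===== LEMMAS AND PROOFS =====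

-- digit sum of a natural number, least-significant digit first
def dsum (n : Nat) : Int :=
  if n = 0 then 0 else ((n % 10 : Nat) : Int) + dsum (n / 10)
decreasing_by exact Nat.div_lt_self (Nat.pos_of_ne_zero (by assumption)) (by omega)

-- A's per-character step on a digit character adds the digit's value
lemma ofChars?_digitChar (d : Nat) (h : d < 10) :
    PySem.Int.ofChars? [Nat.digitChar d] = some (d : Int) := by
  interval_cases d <;> decide

-- toDigitsCore pushes its accumulator to the right
lemma tdc_append (fuel : Nat) : ∀ (n : Nat) (acc : List Char),
    Nat.toDigitsCore 10 fuel n acc = Nat.toDigitsCore 10 fuel n [] ++ acc := by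
  induction fuel with
  | zero => intro n acc; simp [Nat.toDigitsCore]
  | succ f ih =>
    intro n acc
    simp only [Nat.toDigitsCore]
    by_cases h : n / 10 = 0
    · simp [h]
    · simp only [h, if_false]
      rw [ih (n / 10) ((n % 10).digitChar :: acc), ih (n / 10) [(n % 10).digitChar]]
      simp

-- A's Option-fold over the digit characters of n computes s + dsum n
lemma foldA_toDigitsCore (fuel : Nat) : ∀ (n : Nat) (s : Int), n < fuel →
    List.foldl (fun acc c => acc.bind fun s => (PySem.Int.ofChars? [c]).map fun t => s + t)
      (some s) (Nat.toDigitsCore 10 fuel n []) = some (s + dsum n) := by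
  induction fuel with
  | zero => intro n s h; omega
  | succ f ih =>
    intro n s hn
    simp only [Nat.toDigitsCore]
    by_cases h : n / 10 = 0
    · have hd : n % 10 = n := by omega
      simp only [h, if_true, List.foldl_cons, List.foldl_nil, Option.bind_some,
        ofChars?_digitChar (n % 10) (by omega)]
      by_cases hz : n = 0
      · simp [hz]
        rw [dsum]; simp
      · rw [dsum, if_neg hz, h]
        rw [show dsum 0 = 0 from by rw [dsum]; simp]
        simp [hd]
    · have hnz : n ≠ 0 := by omega
      have hds : dsum n = ((n % 10 : Nat) : Int) + dsum (n / 10) := by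
        rw [dsum, if_neg hnz]
      simp only [h, if_false]
      rw [tdc_append, List.foldl_append, ih (n / 10) s (by omega)]
      simp only [List.foldl_cons, List.foldl_nil, Option.bind_some,
        ofChars?_digitChar (n % 10) (by omega), Option.map_some, Option.some.injEq]
      rw [hds]; ring

-- B's loop computes s + dsum m on nonnegative inputs
lemma digitLoop_eq (m : Nat) : ∀ (s : Int), digitLoop (m : Int) s = s + dsum m := by
  induction m using Nat.strong_induction_on with
  | _ m ih =>
    intro s
    rw [digitLoop]
    by_cases h : m = 0
    · subst h
      rw [dif_neg (by norm_num)]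
      rw [show dsum 0 = 0 from by rw [dsum]; simp]
      ring
    · rw [dif_pos (show (0:Int) < (m:Int) by exact_mod_cast Nat.pos_of_ne_zero h)]
      have h1 : PySem.Int.floordiv (m:Int) 10 = ((m / 10 : Nat) : Int) := by
        exact_mod_cast PySem.Int.floordiv_natCast m 10
      have h2 : PySem.Int.mod (m:Int) 10 = ((m % 10 : Nat) : Int) := by
        exact_mod_cast PySem.Int.mod_natCast m 10
      have hds : dsum m = ((m % 10 : Nat) : Int) + dsum (m / 10) := by
        rw [dsum, if_neg h]
      rw [h1, h2, ih (m / 10) (Nat.div_lt_self (Nat.pos_of_ne_zero h) (by omega)), hds]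
      ring

-- ===== VERDICT (by name: the statement is the Claim_ definition above) =====
theorem solution_spec : Claim_equal_solution := by
  intro x _ hpre
  unfold Pre_solution at hpre
  unfold Spec_solution solution solution_alt
  obtain ⟨m, rfl⟩ : ∃ m : Nat, x = (m : Int) := ⟨x.toNat, by omega⟩
  have hm : 0 < m := by exact_mod_cast hpre
  have htc : PySem.Int.toChars (m : Int) = Nat.toDigitsCore 10 (m + 1) m [] := by
    simp [PySem.Int.toChars, Nat.toDigits, if_neg (by omega : ¬ ((m : Int) < 0))]
  rw [htc, foldA_toDigitsCore (m + 1) m 0 (by omega), digitLoop_eq m 0]
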